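-- pv_equiv track=rewrite | github.com/socna/rlcard | rlcard/games/dummy/melding.py | get_all_set_melds
-- ===== SOURCE A (Python) =====
-- from typing import List
--
-- def get_rank_id(card_id: int):
--     return card_id % 13
--
-- def get_all_set_melds(cards: List[int]):
--     hand_by_rank  = sorted(cards, key=get_rank_id)
--
--     max_set_melds = []
--     current_rank = None
--     set_meld = []
--
--     for card_id in hand_by_rank:
--         if current_rank is None or current_rank == get_rank_id(card_id):
--             set_meld.append(card_id)
--         else:
--             if len(set_meld) >= 3:
--                 max_set_melds.append(set_meld)
--             set_meld = [card_id]
--         current_rank = get_rank_id(card_id)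
--
--     if len(set_meld) >= 3:
--         max_set_melds.append(set_meld)
--
--     result = []
--     for max_set_meld in max_set_melds:
--         result.append(max_set_meld)
--         if len(max_set_meld) == 4:
--             for meld_card in max_set_meld:
--                 result.append([card for card in max_set_meld if card != meld_card])
--     return result
-- ===== SOURCE B (Python) =====
-- from typing import List
--
-- def get_rank_id(card_id: int):
--     return card_id % 13
--
-- def get_all_set_melds(cards: List[int]):
--     # Bucket the hand by rank in one pass; ascending rank order replaces the sort,
--     # bucket membership replaces the sentinel run-detection loop.
--     buckets = [[] for _ in range(13)]
--     for card_id in cards: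
--         buckets[get_rank_id(card_id)].append(card_id)
--     result = []
--     for bucket in buckets:
--         if len(bucket) >= 3:
--             result.append(bucket)
--             if len(bucket) == 4:
--                 for meld_card in bucket:
--                     result.append([card for card in bucket if card != meld_card])
--     return result
-- ===== Notes on version B (the rewrite author's own statement) =====
-- stated objective: faster
-- what changed: Replaces the stable sort plus sentinel-based run-detection loop with a single bucketing pass into 13 rank-indexed lists scanned in ascending rank order.
import Mathlib
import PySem

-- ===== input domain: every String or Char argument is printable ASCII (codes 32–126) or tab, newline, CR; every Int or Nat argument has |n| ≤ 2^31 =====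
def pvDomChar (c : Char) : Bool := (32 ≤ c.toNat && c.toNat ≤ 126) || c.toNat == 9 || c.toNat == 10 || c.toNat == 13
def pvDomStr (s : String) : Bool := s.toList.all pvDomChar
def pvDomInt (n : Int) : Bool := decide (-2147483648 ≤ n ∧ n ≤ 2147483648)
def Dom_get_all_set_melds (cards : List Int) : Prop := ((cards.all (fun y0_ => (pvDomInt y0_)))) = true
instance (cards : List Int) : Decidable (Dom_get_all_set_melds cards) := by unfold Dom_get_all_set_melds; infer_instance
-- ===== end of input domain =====

-- B replaces the stable sort + sentinel run-detection loop by one bucketing pass over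
-- 13 rank-indexed lists scanned in ascending rank order (objective: faster, measured).

-- ===== PORT A =====
-- shared module-level helper of both Pythons
def get_rank_id (card_id : Int) : Int := PySem.Int.mod card_id 13

-- body of A's grouping loop (state: max_set_melds, current_rank, set_meld)
def pvAStep (st : List (List Int) × Option Int × List Int) (card_id : Int) :
    List (List Int) × Option Int × List Int :=
  match st with
  | (m, cr, sm) =>
    if cr = none ∨ cr = some (get_rank_id card_id) then
      (m, some (get_rank_id card_id), sm ++ [card_id])
    else
      ((if 3 ≤ sm.length then m ++ [sm] else m), some (get_rank_id card_id), [card_id])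

-- body of the result loop: append the meld and, if it has 4 cards, its four 3-card subsets
-- (this code is literally shared by A and Source B)
def pvMeldExpand (result : List (List Int)) (meld : List Int) : List (List Int) :=
  let result := result ++ [meld]
  if meld.length = 4 then
    meld.foldl (fun r meld_card => r ++ [meld.filter (fun card => card != meld_card)]) result
  else result

def get_all_set_melds (cards : List Int) : List (List Int) :=
  let hand_by_rank := PySem.List.sorted cards (fun c => get_rank_id c)
  let st := hand_by_rank.foldl pvAStep ([], none, [])
  let max_set_melds := if 3 ≤ st.2.2.length then st.1 ++ [st.2.2] else st.1
  max_set_melds.foldl pvMeldExpand []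

-- ===== PORT B =====
def get_all_set_melds_alt (cards : List Int) : List (List Int) :=
  let buckets := cards.foldl
    (fun bs c => bs.modify (get_rank_id c).toNat (fun b => b ++ [c]))
    (List.replicate 13 [])
  buckets.foldl (fun result bucket =>
    if 3 ≤ bucket.length then pvMeldExpand result bucket else result) []

-- ===== PRECONDITION & SPEC =====
def Spec_get_all_set_melds (cards : List Int) (out : List (List Int)) : Prop := out = get_all_set_melds_alt cards
instance (cards : List Int) (out : List (List Int)) : Decidable (Spec_get_all_set_melds cards out) := by unfold Spec_get_all_set_melds; infer_instance

-- ===== CLAIM (what is proved, stated in full; the proofs are below) =====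
def Claim_equal_get_all_set_melds : Prop := ∀ (cards : List Int), Dom_get_all_set_melds cards → Spec_get_all_set_melds cards (get_all_set_melds cards)

-- ===== LEMMAS AND PROOFS =====

-- the cards of cards whose rank is r, in input order
def pvBucket (cards : List Int) (r : Nat) : List Int :=
  cards.filter (fun c => get_rank_id c == (r : Int))

-- the final flush of A's grouping loop (same `if` as in the port)
def pvFlush (st : List (List Int) × Option Int × List Int) : List (List Int) :=
  if 3 ≤ st.2.2.length then st.1 ++ [st.2.2] else st.1

theorem pvRank_nonneg (c : Int) : 0 ≤ get_rank_id c := PySem.Int.mod_nonneg c (by norm_num)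

theorem pvRank_lt (c : Int) : get_rank_id c < 13 := PySem.Int.mod_lt c (by norm_num)

theorem pvRank_cast_toNat (c : Int) : ((get_rank_id c).toNat : Int) = get_rank_id c := by
  have := pvRank_nonneg c; omega

-- L1: the bucketing foldl of B computes the 13 rank filters
theorem pvBuckets_eq (cards : List Int) : ∀ g : Nat → List Int,
    cards.foldl (fun bs c => bs.modify (get_rank_id c).toNat (fun b => b ++ [c]))
      ((List.range 13).map g)
    = (List.range 13).map (fun r => g r ++ pvBucket cards r) := by
  induction cards with
  | nil => intro g; simp [pvBucket]
  | cons c cs ih =>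
    intro g
    have hstep : ((List.range 13).map g).modify (get_rank_id c).toNat (fun b => b ++ [c])
        = (List.range 13).map (fun r => if (get_rank_id c).toNat = r then g r ++ [c] else g r) := by
      apply List.ext_getElem
      · simp
      · intro j h1 h2
        simp only [List.getElem_modify, List.getElem_map, List.getElem_range]
    simp only [List.foldl_cons, hstep, ih]
    apply List.map_congr_left
    intro r hr
    by_cases h : (get_rank_id c).toNat = r
    · have hc : (get_rank_id c == (r : Int)) = true := by
        simp only [beq_iff_eq]; rw [← h]; exact (pvRank_cast_toNat c).symm
      simp only [pvBucket, List.filter_cons, hc, if_pos h, List.append_assoc,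
        List.singleton_append, if_true]
    · have hc : (get_rank_id c == (r : Int)) = false := by
        simp only [beq_eq_false_iff_ne, ne_eq]
        intro he
        apply h
        have := pvRank_cast_toNat c
        omega
      simp only [pvBucket, List.filter_cons, hc, if_neg h, Bool.false_eq_true, if_false]

-- insertBy helpers for the stable-sort characterisation
theorem pvInsertBy_append_left {α : Type} (p : α → α → Bool) (x : α) (l1 l2 : List α)
    (h1 : ∀ y ∈ l1, p x y = false) :
    PySem.List.insertBy p x (l1 ++ l2) = l1 ++ PySem.List.insertBy p x l2 := by
  induction l1 with
  | nil => rfl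
  | cons a t ih =>
    simp only [List.cons_append, PySem.List.insertBy, h1 a (by simp)]
    simp only [Bool.false_eq_true, if_false]
    exact congrArg (a :: ·) (ih (fun y hy => h1 y (by simp [hy])))

theorem pvInsertBy_middle {α : Type} (p : α → α → Bool) (x : α) (l1 l2 : List α)
    (h1 : ∀ y ∈ l1, p x y = false) (h2 : ∀ y ∈ l2, p x y = true) :
    PySem.List.insertBy p x (l1 ++ l2) = l1 ++ x :: l2 := by
  rw [pvInsertBy_append_left p x l1 l2 h1]
  cases l2 with
  | nil => rfl
  | cons b t => simp [PySem.List.insertBy, h2 b (by simp)]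

theorem pvFlatMap_congr {α β : Type} (l : List α) (f g : α → List β)
    (h : ∀ a ∈ l, f a = g a) : l.flatMap f = l.flatMap g := by
  induction l with
  | nil => rfl
  | cons a t ih =>
    simp only [List.flatMap_cons, h a (by simp), ih (fun b hb => h b (by simp [hb]))]

theorem pvMem_flatMap_rank {rs : List Nat} {f : Nat → List Int}
    (hf : ∀ r ∈ rs, ∀ c ∈ f r, get_rank_id c = (r : Int)) {y : Int}
    (hy : y ∈ rs.flatMap f) : ∃ r ∈ rs, get_rank_id y = (r : Int) := by
  rcases List.mem_flatMap.1 hy with ⟨r, hr, hyr⟩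
  exact ⟨r, hr, hf r hr y hyr⟩

theorem pvInsert_flatMap (rs : List Nat) (f : Nat → List Int) (x : Int)
    (hf : ∀ r ∈ rs, ∀ c ∈ f r, get_rank_id c = (r : Int))
    (hx : (get_rank_id x).toNat ∈ rs)
    (hmono : rs.Pairwise (· < ·)) :
    PySem.List.insertBy (fun a b => decide (get_rank_id a < get_rank_id b)) x (rs.flatMap f)
    = rs.flatMap (fun r => if r = (get_rank_id x).toNat then f r ++ [x] else f r) := by
  induction rs with
  | nil => cases hx
  | cons r rs' ih =>
    have hpw := (List.pairwise_cons.1 hmono)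
    by_cases h : r = (get_rank_id x).toNat
    · -- x belongs in this bucket
      have hxr : get_rank_id x = (r : Int) := by rw [h]; exact (pvRank_cast_toNat x).symm
      have hnot : ∀ r' ∈ rs', ¬ (r' = (get_rank_id x).toNat) := by
        intro r' hr' he; have := hpw.1 r' hr'; omega
      rw [List.flatMap_cons,
        pvInsertBy_middle _ x (f r) (rs'.flatMap f)
          (by intro y hy; have := hf r (by simp) y hy; simp [this, hxr])
          (by intro y hy
              rcases pvMem_flatMap_rank (fun a ha => hf a (by simp [ha])) hy with ⟨r', hr', hk⟩
              have h1 := hpw.1 r' hr'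
              simp only [decide_eq_true_eq, hk, hxr]
              exact_mod_cast h1),
        List.flatMap_cons, if_pos h,
        pvFlatMap_congr rs' _ f (fun a ha => if_neg (hnot a ha))]
      simp
    · -- x belongs further right
      have hx' : (get_rank_id x).toNat ∈ rs' := by
        rcases hx with _ | h'
        · exact absurd rfl h
        · assumption
      have hlt : r < (get_rank_id x).toNat := hpw.1 _ hx'
      rw [List.flatMap_cons,
        pvInsertBy_append_left _ x (f r) (rs'.flatMap f)
          (by intro y hy
              have hk := hf r (by simp) y hy
              have := pvRank_cast_toNat x
              simp only [decide_eq_false_iff_not, hk, not_lt]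
              omega),
        ih (fun a ha => hf a (by simp [ha])) hx' hpw.2,
        List.flatMap_cons, if_neg (by omega)]

theorem pvSorted_eq_flatMap (cards : List Int) :
    PySem.List.sorted cards (fun c => get_rank_id c)
    = (List.range 13).flatMap (pvBucket cards) := by
  induction cards using List.reverseRecOn with
  | nil => simp [PySem.List.sorted_eq_foldl_insertBy, pvBucket]
  | append_singleton xs x ih =>
    rw [PySem.List.sorted_eq_foldl_insertBy, List.foldl_append, List.foldl_cons, List.foldl_nil,
      ← PySem.List.sorted_eq_foldl_insertBy, ih,
      pvInsert_flatMap (List.range 13) (pvBucket xs) x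
        (by intro r hr c hc
            have := List.of_mem_filter hc
            simpa using this)
        (by simp only [List.mem_range]
            have := pvRank_lt x; have := pvRank_nonneg x; omega)
        (List.pairwise_lt_range)]
    apply pvFlatMap_congr
    intro r hr
    have hcast := pvRank_cast_toNat x
    by_cases h : r = (get_rank_id x).toNat
    · have hb : (get_rank_id x == (r : Int)) = true := by simp only [beq_iff_eq]; omega
      rw [if_pos h]
      simp only [pvBucket, List.filter_append]
      congr 1
      simp only [List.filter_cons, hb, List.filter_nil, if_true]
    · have hb : (get_rank_id x == (r : Int)) = false := by
        simp only [beq_eq_false_iff_ne, ne_eq]; intro he; apply h; omega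
      rw [if_neg h]
      simp only [pvBucket, List.filter_append, List.filter_cons, hb, Bool.false_eq_true,
        if_false, List.filter_nil, List.append_nil]

-- L3a: folding a block of constant rank just appends it to set_meld
theorem pvFold_block (b : List Int) (r : Int) (hb : ∀ c ∈ b, get_rank_id c = r) :
    ∀ (m : List (List Int)) (sm : List Int),
    b.foldl pvAStep (m, some r, sm) = (m, some r, sm ++ b) := by
  induction b with
  | nil => intro m sm; simp
  | cons c t ih =>
    intro m sm
    have hc : get_rank_id c = r := hb c (by simp)
    simp only [List.foldl_cons, pvAStep, hc, or_true, if_pos, reduceCtorEq]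
    rw [ih (fun y hy => hb y (by simp [hy]))]
    simp

-- L3b: a nonempty block of a fresh rank flushes set_meld and restarts it
theorem pvFold_block_cons (b : List Int) (c : Int) (r : Int)
    (hc : get_rank_id c = r) (hb : ∀ y ∈ b, get_rank_id y = r)
    (m : List (List Int)) (cr : Option Int) (sm : List Int)
    (hne : cr ≠ some r) (h0 : cr = none → sm = []) :
    (c :: b).foldl pvAStep (m, cr, sm) = (pvFlush (m, cr, sm), some r, c :: b) := by
  cases cr with
  | none =>
    have hsm := h0 rfl
    simp only [List.foldl_cons, pvAStep, hsm, hc, true_or, if_true]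
    rw [pvFold_block b r hb]
    simp [pvFlush]
  | some r0 =>
    have hr0 : r0 ≠ r := fun h => hne (by rw [h])
    simp only [List.foldl_cons, pvAStep, hc]
    rw [if_neg (by simp [hr0])]
    rw [pvFold_block b r hb]
    simp [pvFlush]

-- L3: grouping over the flattened buckets keeps exactly the blocks of length >= 3
theorem pvGroup_blocks (rs : List Nat) (f : Nat → List Int)
    (hf : ∀ r ∈ rs, ∀ c ∈ f r, get_rank_id c = (r : Int))
    (hdist : rs.Pairwise (· ≠ ·)) :
    ∀ (m : List (List Int)) (cr : Option Int) (sm : List Int),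
    (∀ r ∈ rs, cr ≠ some (r : Int)) → (cr = none → sm = []) →
    pvFlush ((rs.flatMap f).foldl pvAStep (m, cr, sm))
    = pvFlush (m, cr, sm) ++ (rs.map f).filter (fun b => 3 ≤ b.length) := by
  induction rs with
  | nil => intro m cr sm _ _; simp
  | cons r rs' ih =>
    intro m cr sm hcr h0
    have hpw := List.pairwise_cons.1 hdist
    have hf' : ∀ a ∈ rs', ∀ c ∈ f a, get_rank_id c = (a : Int) :=
      fun a ha => hf a (by simp [ha])
    rw [List.flatMap_cons, List.foldl_append, List.map_cons, List.filter_cons]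
    cases hfr : f r with
    | nil =>
      have : ¬ (3 ≤ ([] : List Int).length) := by simp
      rw [List.foldl_nil, ih hf' hdist.of_cons m cr sm (fun a ha => hcr a (by simp [ha])) h0]
      simp
    | cons c b =>
      have hcb : ∀ y ∈ c :: b, get_rank_id y = (r : Int) := by rw [← hfr]; exact hf r (by simp)
      rw [pvFold_block_cons b c (r : Int) (hcb c (by simp)) (fun y hy => hcb y (by simp [hy]))
        m cr sm (hcr r (by simp)) h0]
      rw [ih hf' hdist.of_cons (pvFlush (m, cr, sm)) (some (r : Int)) (c :: b)
        (by intro a ha h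
            have := hpw.1 a ha
            have : (r : Int) = (a : Int) := by injection h
            omega)
        (by intro h; cases h)]
      by_cases h3 : 2 ≤ b.length
      · simp [pvFlush, h3]
      · simp [pvFlush, h3]

-- L4: B's guarded fold is the fold of pvMeldExpand over the filtered bucket list
theorem pvFilter_fold (bs : List (List Int)) : ∀ res : List (List Int),
    bs.foldl (fun result bucket =>
      if 3 ≤ bucket.length then pvMeldExpand result bucket else result) res
    = (bs.filter (fun b => 3 ≤ b.length)).foldl pvMeldExpand res := by
  induction bs with
  | nil => intro res; rfl
  | cons b t ih =>
    intro res
    by_cases h : 3 ≤ b.length <;> simp [h, ih]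

-- ===== VERDICT (by name: the statement is the Claim_ definition above) =====
theorem get_all_set_melds_spec : Claim_equal_get_all_set_melds := by
  intro cards _
  unfold Spec_get_all_set_melds
  have hA : get_all_set_melds cards
      = (((List.range 13).map (pvBucket cards)).filter (fun b => 3 ≤ b.length)).foldl
          pvMeldExpand [] := by
    show (pvFlush ((PySem.List.sorted cards (fun c => get_rank_id c)).foldl
        pvAStep ([], none, []))).foldl pvMeldExpand [] = _
    rw [pvSorted_eq_flatMap cards,
      pvGroup_blocks (List.range 13) (pvBucket cards)
        (by intro r hr c hc; simpa using List.of_mem_filter hc)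
        (List.pairwise_lt_range.imp (fun h => Nat.ne_of_lt h))
        [] none [] (by simp) (fun _ => rfl)]
    simp [pvFlush]
  have hB : get_all_set_melds_alt cards
      = (((List.range 13).map (pvBucket cards)).filter (fun b => 3 ≤ b.length)).foldl
          pvMeldExpand [] := by
    show (cards.foldl (fun bs c => bs.modify (get_rank_id c).toNat (fun b => b ++ [c]))
        (List.replicate 13 [])).foldl
        (fun result bucket => if 3 ≤ bucket.length then pvMeldExpand result bucket else result)
        [] = _
    rw [show (List.replicate 13 ([] : List Int)) = (List.range 13).map (fun _ => []) by
        simp [List.map_const'],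
      pvBuckets_eq cards (fun _ => []), pvFilter_fold]
    simp
  rw [hA, hB]
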